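-- pv_equiv track=rewrite | github.com/mriamys/Discord_mriamys | cogs/leveling.py | get_rank_role_name_for_level
-- ===== SOURCE A (Python) =====
-- MEME_RANKS = {
--     0: "[🌫️] Кринж",
--     5: "[👞] Попуск",
--     10: "[👶] Шкет",
--     15: "[🍺] Подпивас",
--     20: "[🧔] Скуф",
--     25: "[🧘] На чилле",
--     30: "[🕺] Флексер",
--     35: "[🕶️] Нормис",
--     40: "[🔥] Тот самый",
--     45: "[👌] Мегахорош",
--     50: "[🗿] Гигачад",
--     55: "[⚡] Сигма",
--     60: "[🧚] Альтушка",
--     65: "[👵] Олд",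
--     70: "[🌟] Легенда",
--     75: "[🧔‍♂️] Гранд-Скуф",
--     80: "[👑] Папич",
--     90: "[🏋️] Босс качалки",
--     100: "[🌌] Абсолют"
-- }
--
-- def get_rank_role_name_for_level(level):
--     highest_rank = MEME_RANKS[0]
--     for lvl in sorted(MEME_RANKS.keys()):
--         if level >= lvl:
--             highest_rank = MEME_RANKS[lvl]
--         else:
--             break
--     return highest_rank
-- ===== SOURCE B (Python) =====
-- MEME_RANKS = {
--     0: "[🌫️] Кринж",
--     5: "[👞] Попуск",
--     10: "[👶] Шкет",
--     15: "[🍺] Подпивас",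
--     20: "[🧔] Скуф",
--     25: "[🧘] На чилле",
--     30: "[🕺] Флексер",
--     35: "[🕶️] Нормис",
--     40: "[🔥] Тот самый",
--     45: "[👌] Мегахорош",
--     50: "[🗿] Гигачад",
--     55: "[⚡] Сигма",
--     60: "[🧚] Альтушка",
--     65: "[👵] Олд",
--     70: "[🌟] Легенда",
--     75: "[🧔‍♂️] Гранд-Скуф",
--     80: "[👑] Папич",
--     90: "[🏋️] Босс качалки",
--     100: "[🌌] Абсолют"
-- }
--
-- _KEYS = sorted(MEME_RANKS)
--
-- def get_rank_role_name_for_level(level):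
--     # binary search: lo = bisect_right(_KEYS, level)
--     lo, hi = 0, len(_KEYS)
--     while lo < hi:
--         mid = (lo + hi) // 2
--         if level < _KEYS[mid]:
--             hi = mid
--         else:
--             lo = mid + 1
--     if lo == 0:
--         return MEME_RANKS[0]
--     return MEME_RANKS[_KEYS[lo - 1]]
-- ===== Notes on version B (the rewrite author's own statement) =====
-- stated objective: alternative
-- what changed: Replaces the linear scan with early break over sorted keys by a hand-rolled bisect_right binary search on the sorted key list, falling back to the lowest rank when the level is below every threshold.
import Mathlib
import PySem

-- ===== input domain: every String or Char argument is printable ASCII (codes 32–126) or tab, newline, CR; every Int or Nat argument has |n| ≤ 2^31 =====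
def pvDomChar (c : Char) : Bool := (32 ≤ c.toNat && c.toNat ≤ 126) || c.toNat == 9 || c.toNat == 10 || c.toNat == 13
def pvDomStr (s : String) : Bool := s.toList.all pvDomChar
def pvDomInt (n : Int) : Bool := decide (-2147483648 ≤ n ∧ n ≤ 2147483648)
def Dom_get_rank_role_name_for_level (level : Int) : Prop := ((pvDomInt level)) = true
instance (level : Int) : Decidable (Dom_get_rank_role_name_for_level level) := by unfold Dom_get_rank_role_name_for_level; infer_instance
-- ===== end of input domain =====

-- B replaces A's linear scan (with early break) over the sorted thresholds by a
-- bisect_right-style binary search on the sorted key list; same return value everywhere.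

-- ===== PORT A =====
def MEME_RANKS : PySem.Dict Int String :=
  PySem.Dict.ofList [(0, "[🌫️] Кринж"), (5, "[👞] Попуск"), (10, "[👶] Шкет"), (15, "[🍺] Подпивас"),
   (20, "[🧔] Скуф"), (25, "[🧘] На чилле"), (30, "[🕺] Флексер"), (35, "[🕶️] Нормис"),
   (40, "[🔥] Тот самый"), (45, "[👌] Мегахорош"), (50, "[🗿] Гигачад"), (55, "[⚡] Сигма"),
   (60, "[🧚] Альтушка"), (65, "[👵] Олд"), (70, "[🌟] Легенда"), (75, "[🧔‍♂️] Гранд-Скуф"),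
   (80, "[👑] Папич"), (90, "[🏋️] Босс качалки"), (100, "[🌌] Абсолют")]

-- for lvl in sorted(MEME_RANKS.keys()): if level >= lvl: highest = MEME_RANKS[lvl] else: break
-- MEME_RANKS[lvl] never raises (lvl is a key); the getD default "" is unreachable.
def pvALoop (level : Int) (highest : String) : List Int → String
  | [] => highest
  | lvl :: rest =>
      if level ≥ lvl then pvALoop level ((PySem.Dict.get? MEME_RANKS lvl).getD "") rest
      else highest

def get_rank_role_name_for_level (level : Int) : String :=
  pvALoop level ((PySem.Dict.get? MEME_RANKS 0).getD "")
    (PySem.List.sorted (PySem.Dict.keys MEME_RANKS) (fun x => x) false)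

-- ===== PORT B =====
-- _KEYS = sorted(MEME_RANKS)
def pvKEYS : List Int := PySem.List.sorted (PySem.Dict.keys MEME_RANKS) (fun x => x) false

-- the while-loop of Source B's hand-rolled bisect_right
def pvBisect (level : Int) (lo hi : Nat) : Nat :=
  if h : lo < hi then
    let mid := (lo + hi) / 2
    if level < pvKEYS.getD mid 0 then pvBisect level lo mid
    else pvBisect level (mid + 1) hi
  else lo
termination_by hi - lo
decreasing_by all_goals omega

def get_rank_role_name_for_level_alt (level : Int) : String :=
  let lo := pvBisect level 0 pvKEYS.length
  if lo = 0 then (PySem.Dict.get? MEME_RANKS 0).getD ""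
  else (PySem.Dict.get? MEME_RANKS (pvKEYS.getD (lo - 1) 0)).getD ""

-- ===== PRECONDITION & SPEC =====
def Spec_get_rank_role_name_for_level (level : Int) (out : String) : Prop := out = get_rank_role_name_for_level_alt level
instance (level : Int) (out : String) : Decidable (Spec_get_rank_role_name_for_level level out) := by unfold Spec_get_rank_role_name_for_level; infer_instance

-- ===== CLAIM (what is proved, stated in full; the proofs are below) =====
def Claim_equal_get_rank_role_name_for_level : Prop := ∀ (level : Int), Dom_get_rank_role_name_for_level level → Spec_get_rank_role_name_for_level level (get_rank_role_name_for_level level)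

-- ===== LEMMAS AND PROOFS =====
theorem sortedKeys_eval :
    PySem.List.sorted (PySem.Dict.keys MEME_RANKS) (fun x => x) false =
      [0, 5, 10, 15, 20, 25, 30, 35, 40, 45, 50, 55, 60, 65, 70, 75, 80, 90, 100] := by
  decide

theorem pvLookup_0 : (PySem.Dict.get? MEME_RANKS (0 : Int)).getD "" = "[🌫️] Кринж" := by decide
theorem pvLookup_5 : (PySem.Dict.get? MEME_RANKS (5 : Int)).getD "" = "[👞] Попуск" := by decide
theorem pvLookup_10 : (PySem.Dict.get? MEME_RANKS (10 : Int)).getD "" = "[👶] Шкет" := by decide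
theorem pvLookup_15 : (PySem.Dict.get? MEME_RANKS (15 : Int)).getD "" = "[🍺] Подпивас" := by decide
theorem pvLookup_20 : (PySem.Dict.get? MEME_RANKS (20 : Int)).getD "" = "[🧔] Скуф" := by decide
theorem pvLookup_25 : (PySem.Dict.get? MEME_RANKS (25 : Int)).getD "" = "[🧘] На чилле" := by decide
theorem pvLookup_30 : (PySem.Dict.get? MEME_RANKS (30 : Int)).getD "" = "[🕺] Флексер" := by decide
theorem pvLookup_35 : (PySem.Dict.get? MEME_RANKS (35 : Int)).getD "" = "[🕶️] Нормис" := by decide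
theorem pvLookup_40 : (PySem.Dict.get? MEME_RANKS (40 : Int)).getD "" = "[🔥] Тот самый" := by decide
theorem pvLookup_45 : (PySem.Dict.get? MEME_RANKS (45 : Int)).getD "" = "[👌] Мегахорош" := by decide
theorem pvLookup_50 : (PySem.Dict.get? MEME_RANKS (50 : Int)).getD "" = "[🗿] Гигачад" := by decide
theorem pvLookup_55 : (PySem.Dict.get? MEME_RANKS (55 : Int)).getD "" = "[⚡] Сигма" := by decide
theorem pvLookup_60 : (PySem.Dict.get? MEME_RANKS (60 : Int)).getD "" = "[🧚] Альтушка" := by decide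
theorem pvLookup_65 : (PySem.Dict.get? MEME_RANKS (65 : Int)).getD "" = "[👵] Олд" := by decide
theorem pvLookup_70 : (PySem.Dict.get? MEME_RANKS (70 : Int)).getD "" = "[🌟] Легенда" := by decide
theorem pvLookup_75 : (PySem.Dict.get? MEME_RANKS (75 : Int)).getD "" = "[🧔‍♂️] Гранд-Скуф" := by decide
theorem pvLookup_80 : (PySem.Dict.get? MEME_RANKS (80 : Int)).getD "" = "[👑] Папич" := by decide
theorem pvLookup_90 : (PySem.Dict.get? MEME_RANKS (90 : Int)).getD "" = "[🏋️] Босс качалки" := by decide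
theorem pvLookup_100 : (PySem.Dict.get? MEME_RANKS (100 : Int)).getD "" = "[🌌] Абсолют" := by decide

-- the common reduced form of both ports: a chain of threshold tests
def pvRef (level : Int) : String :=
  (if (0 : Int) ≤ level then (if (5 : Int) ≤ level then (if (10 : Int) ≤ level then (if (15 : Int) ≤ level then (if (20 : Int) ≤ level then (if (25 : Int) ≤ level then (if (30 : Int) ≤ level then (if (35 : Int) ≤ level then (if (40 : Int) ≤ level then (if (45 : Int) ≤ level then (if (50 : Int) ≤ level then (if (55 : Int) ≤ level then (if (60 : Int) ≤ level then (if (65 : Int) ≤ level then (if (70 : Int) ≤ level then (if (75 : Int) ≤ level then (if (80 : Int) ≤ level then (if (90 : Int) ≤ level then (if (100 : Int) ≤ level then "[🌌] Абсолют" else "[🏋️] Босс качалки") else "[👑] Папич") else "[🧔‍♂️] Гранд-Скуф") else "[🌟] Легенда") else "[👵] Олд") else "[🧚] Альтушка") else "[⚡] Сигма") else "[🗿] Гигачад") else "[👌] Мегахорош") else "[🔥] Тот самый") else "[🕶️] Нормис") else "[🕺] Флексер") else "[🧘] На чилле") else "[🧔] Скуф") else "[🍺] Подпивас") else "[👶]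 Шкет") else "[👞] Попуск") else "[🌫️] Кринж") else "[🌫️] Кринж")

theorem pvA_eq_ref (level : Int) : get_rank_role_name_for_level level = pvRef level := by
  simp only [get_rank_role_name_for_level, sortedKeys_eval]
  simp only [pvRef]
  simp [pvALoop, pvLookup_0, pvLookup_5, pvLookup_10, pvLookup_15, pvLookup_20, pvLookup_25, pvLookup_30, pvLookup_35, pvLookup_40, pvLookup_45, pvLookup_50, pvLookup_55, pvLookup_60, pvLookup_65, pvLookup_70, pvLookup_75, pvLookup_80, pvLookup_90, pvLookup_100]

set_option maxRecDepth 8000 in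
set_option maxHeartbeats 4000000 in
theorem pvB_eq_ref (level : Int) : get_rank_role_name_for_level_alt level = pvRef level := by
  simp only [get_rank_role_name_for_level_alt, pvKEYS, sortedKeys_eval]
  conv_lhs =>
    simp [pvBisect]
    simp only [pvKEYS, sortedKeys_eval]
    simp only [List.getElem?_cons_succ, List.getElem?_cons_zero, Option.getD_some]
  rcases (show level < 0 ∨ (0 ≤ level ∧ level < 5) ∨ (5 ≤ level ∧ level < 10) ∨ (10 ≤ level ∧ level < 15) ∨ (15 ≤ level ∧ level < 20) ∨ (20 ≤ level ∧ level < 25) ∨ (25 ≤ level ∧ level < 30) ∨ (30 ≤ level ∧ level < 35) ∨ (35 ≤ level ∧ level < 40) ∨ (40 ≤ level ∧ level < 45) ∨ (45 ≤ level ∧ level < 50) ∨ (50 ≤ level ∧ level < 55) ∨ (55 ≤ level ∧ level < 60) ∨ (60 ≤ level ∧ level < 65) ∨ (65 ≤ level ∧ level < 70) ∨ (70 ≤ level ∧ level < 75) ∨ (75 ≤ level ∧ level < 80) ∨ (80 ≤ level ∧ level < 90) ∨ (90 ≤ level ∧ level < 100) ∨ 100 ≤ level by omega) with h | h | h | h |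 h | h | h | h | h | h | h | h | h | h | h | h | h | h | h | h
  · simp [pvRef, show ¬((0:Int) ≤ level) from by omega, show level < (45:Int) from by omega, show level < (20:Int) from by omega, show level < (10:Int) from by omega, show level < (5:Int) from by omega, show level < (0:Int) from by omega, pvLookup_0]
  · obtain ⟨h1, h2⟩ := h
    simp [pvRef, show (0:Int) ≤ level from by omega, show ¬((5:Int) ≤ level) from by omega, show level < (45:Int) from by omega, show level < (20:Int) from by omega, show level < (10:Int) from by omega, show level < (5:Int) from by omega, show ¬(level < (0:Int)) from by omega, pvLookup_0]
  · obtain ⟨h1, h2⟩ := h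
    simp [pvRef, show (0:Int) ≤ level from by omega, show (5:Int) ≤ level from by omega, show ¬((10:Int) ≤ level) from by omega, show level < (45:Int) from by omega, show level < (20:Int) from by omega, show level < (10:Int) from by omega, show ¬(level < (5:Int)) from by omega, pvLookup_5]
  · obtain ⟨h1, h2⟩ := h
    simp [pvRef, show (0:Int) ≤ level from by omega, show (5:Int) ≤ level from by omega, show (10:Int) ≤ level from by omega, show ¬((15:Int) ≤ level) from by omega, show level < (45:Int) from by omega, show level < (20:Int) from by omega, show ¬(level < (10:Int)) from by omega, show level < (15:Int) from by omega, pvLookup_10]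
  · obtain ⟨h1, h2⟩ := h
    simp [pvRef, show (0:Int) ≤ level from by omega, show (5:Int) ≤ level from by omega, show (10:Int) ≤ level from by omega, show (15:Int) ≤ level from by omega, show ¬((20:Int) ≤ level) from by omega, show level < (45:Int) from by omega, show level < (20:Int) from by omega, show ¬(level < (10:Int)) from by omega, show ¬(level < (15:Int)) from by omega, pvLookup_15]
  · obtain ⟨h1, h2⟩ := h
    simp [pvRef, show (0:Int) ≤ level from by omega, show (5:Int) ≤ level from by omega, show (10:Int) ≤ level from by omega, show (15:Int) ≤ level from by omega, show (20:Int) ≤ level from by omega, show ¬((25:Int) ≤ level) from by omega, show level < (45:Int) from by omega, show ¬(level < (20:Int)) from by omega, show level < (35:Int) from by omega, show level < (30:Int) from by omega, show level < (25:Int) from by omega, pvLookup_20]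
  · obtain ⟨h1, h2⟩ := h
    simp [pvRef, show (0:Int) ≤ level from by omega, show (5:Int) ≤ level from by omega, show (10:Int) ≤ level from by omega, show (15:Int) ≤ level from by omega, show (20:Int) ≤ level from by omega, show (25:Int) ≤ level from by omega, show ¬((30:Int) ≤ level) from by omega, show level < (45:Int) from by omega, show ¬(level < (20:Int)) from by omega, show level < (35:Int) from by omega, show level < (30:Int) from by omega, show ¬(level < (25:Int)) from by omega, pvLookup_25]
  · obtain ⟨h1, h2⟩ := h
    simp [pvRef, show (0:Int) ≤ level from by omega, show (5:Int) ≤ level from by omega, show (10:Int) ≤ level from by omega, show (15:Int) ≤ level from by omega, show (20:Int) ≤ level from by omega, show (25:Int) ≤ level from by omega, show (30:Int) ≤ level from by omega, show ¬((35:Int) ≤ level) from by omega, show level < (45:Int) from by omega, show ¬(level < (20:Int)) from by omega, show level < (35:Int) from by omega, show ¬(level < (30:Int)) from by omega, pvLookup_30]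
  · obtain ⟨h1, h2⟩ := h
    simp [pvRef, show (0:Int) ≤ level from by omega, show (5:Int) ≤ level from by omega, show (10:Int) ≤ level from by omega, show (15:Int) ≤ level from by omega, show (20:Int) ≤ level from by omega, show (25:Int) ≤ level from by omega, show (30:Int) ≤ level from by omega, show (35:Int) ≤ level from by omega, show ¬((40:Int) ≤ level) from by omega, show level < (45:Int) from by omega, show ¬(level < (20:Int)) from by omega, show ¬(level < (35:Int)) from by omega, show level < (40:Int) from by omega, pvLookup_35]
  · obtain ⟨h1, h2⟩ := h
    simp [pvRef, show (0:Int) ≤ level from by omega, show (5:Int) ≤ level from by omega, show (10:Int) ≤ level from by omega, show (15:Int) ≤ level from by omega, show (20:Int) ≤ level from by omega, show (25:Int) ≤ level from by omega, show (30:Int) ≤ level from by omega, show (35:Int) ≤ level from by omega, show (40:Int) ≤ level from by omega, show ¬((45:Int) ≤ level) from by omega, show level < (45:Int) from by omega, show ¬(level < (20:Int)) from by omega, show ¬(level < (35:Int)) from by omega, show ¬(level < (40:Int)) from by omega, pvLookup_40]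
  · obtain ⟨h1, h2⟩ := h
    simp [pvRef, show (0:Int) ≤ level from by omega, show (5:Int) ≤ level from by omega, show (10:Int) ≤ level from by omega, show (15:Int) ≤ level from by omega, show (20:Int) ≤ level from by omega, show (25:Int) ≤ level from by omega, show (30:Int) ≤ level from by omega, show (35:Int) ≤ level from by omega, show (40:Int) ≤ level from by omega, show (45:Int) ≤ level from by omega, show ¬((50:Int) ≤ level) from by omega, show ¬(level < (45:Int)) from by omega, show level < (70:Int) from by omega, show level < (60:Int) from by omega, show level < (55:Int) from by omega, show level < (50:Int) from by omega, pvLookup_45]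
  · obtain ⟨h1, h2⟩ := h
    simp [pvRef, show (0:Int) ≤ level from by omega, show (5:Int) ≤ level from by omega, show (10:Int) ≤ level from by omega, show (15:Int) ≤ level from by omega, show (20:Int) ≤ level from by omega, show (25:Int) ≤ level from by omega, show (30:Int) ≤ level from by omega, show (35:Int) ≤ level from by omega, show (40:Int) ≤ level from by omega, show (45:Int) ≤ level from by omega, show (50:Int) ≤ level from by omega, show ¬((55:Int) ≤ level) from by omega, show ¬(level < (45:Int)) from by omega, show level < (70:Int) from by omega, show level < (60:Int) from by omega, show level < (55:Int) from by omega, show ¬(level < (50:Int)) from by omega, pvLookup_50]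
  · obtain ⟨h1, h2⟩ := h
    simp [pvRef, show (0:Int) ≤ level from by omega, show (5:Int) ≤ level from by omega, show (10:Int) ≤ level from by omega, show (15:Int) ≤ level from by omega, show (20:Int) ≤ level from by omega, show (25:Int) ≤ level from by omega, show (30:Int) ≤ level from by omega, show (35:Int) ≤ level from by omega, show (40:Int) ≤ level from by omega, show (45:Int) ≤ level from by omega, show (50:Int) ≤ level from by omega, show (55:Int) ≤ level from by omega, show ¬((60:Int) ≤ level) from by omega, show ¬(level < (45:Int)) from by omega, show level < (70:Int) from by omega, show level < (60:Int) from by omega, show ¬(level < (55:Int)) from by omega, pvLookup_55]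
  · obtain ⟨h1, h2⟩ := h
    simp [pvRef, show (0:Int) ≤ level from by omega, show (5:Int) ≤ level from by omega, show (10:Int) ≤ level from by omega, show (15:Int) ≤ level from by omega, show (20:Int) ≤ level from by omega, show (25:Int) ≤ level from by omega, show (30:Int) ≤ level from by omega, show (35:Int) ≤ level from by omega, show (40:Int) ≤ level from by omega, show (45:Int) ≤ level from by omega, show (50:Int) ≤ level from by omega, show (55:Int) ≤ level from by omega, show (60:Int) ≤ level from by omega, show ¬((65:Int) ≤ level) from by omega, show ¬(level < (45:Int)) from by omega, show level < (70:Int) from by omega, show ¬(level < (60:Int)) from by omega, show level < (65:Int) from by omega, pvLookup_60]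
  · obtain ⟨h1, h2⟩ := h
    simp [pvRef, show (0:Int) ≤ level from by omega, show (5:Int) ≤ level from by omega, show (10:Int) ≤ level from by omega, show (15:Int) ≤ level from by omega, show (20:Int) ≤ level from by omega, show (25:Int) ≤ level from by omega, show (30:Int) ≤ level from by omega, show (35:Int) ≤ level from by omega, show (40:Int) ≤ level from by omega, show (45:Int) ≤ level from by omega, show (50:Int) ≤ level from by omega, show (55:Int) ≤ level from by omega, show (60:Int) ≤ level from by omega, show (65:Int) ≤ level from by omega, show ¬((70:Int) ≤ level) from by omega, show ¬(level < (45:Int)) from by omega, show level < (70:Int) from by omega, show ¬(level < (60:Int)) from by omega, show ¬(level < (65:Int)) from by omega, pvLookup_65]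
  · obtain ⟨h1, h2⟩ := h
    simp [pvRef, show (0:Int) ≤ level from by omega, show (5:Int) ≤ level from by omega, show (10:Int) ≤ level from by omega, show (15:Int) ≤ level from by omega, show (20:Int) ≤ level from by omega, show (25:Int) ≤ level from by omega, show (30:Int) ≤ level from by omega, show (35:Int) ≤ level from by omega, show (40:Int) ≤ level from by omega, show (45:Int) ≤ level from by omega, show (50:Int) ≤ level from by omega, show (55:Int) ≤ level from by omega, show (60:Int) ≤ level from by omega, show (65:Int) ≤ level from by omega, show (70:Int) ≤ level from by omega, show ¬((75:Int) ≤ level) from by omega, show ¬(level < (45:Int)) from by omega, show ¬(level < (70:Int)) from by omega, show level < (90:Int) from by omega, show level < (80:Int) from by omega, show level < (75:Int) from by omega, pvLookup_70]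
  · obtain ⟨h1, h2⟩ := h
    simp [pvRef, show (0:Int) ≤ level from by omega, show (5:Int) ≤ level from by omega, show (10:Int) ≤ level from by omega, show (15:Int) ≤ level from by omega, show (20:Int) ≤ level from by omega, show (25:Int) ≤ level from by omega, show (30:Int) ≤ level from by omega, show (35:Int) ≤ level from by omega, show (40:Int) ≤ level from by omega, show (45:Int) ≤ level from by omega, show (50:Int) ≤ level from by omega, show (55:Int) ≤ level from by omega, show (60:Int) ≤ level from by omega, show (65:Int) ≤ level from by omega, show (70:Int) ≤ level from by omega, show (75:Int) ≤ level from by omega, show ¬((80:Int) ≤ level) from by omega, show ¬(level < (45:Int)) from by omega, show ¬(level < (70:Int)) from by omega, show level < (90:Int) from by omega, show level < (80:Int) from by omega, show ¬(level < (75:Int)) from by omega, pvLookup_75]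
  · obtain ⟨h1, h2⟩ := h
    simp [pvRef, show (0:Int) ≤ level from by omega, show (5:Int) ≤ level from by omega, show (10:Int) ≤ level from by omega, show (15:Int) ≤ level from by omega, show (20:Int) ≤ level from by omega, show (25:Int) ≤ level from by omega, show (30:Int) ≤ level from by omega, show (35:Int) ≤ level from by omega, show (40:Int) ≤ level from by omega, show (45:Int) ≤ level from by omega, show (50:Int) ≤ level from by omega, show (55:Int) ≤ level from by omega, show (60:Int) ≤ level from by omega, show (65:Int) ≤ level from by omega, show (70:Int) ≤ level from by omega, show (75:Int) ≤ level from by omega, show (80:Int) ≤ level from by omega, show ¬((90:Int) ≤ level) from by omega, show ¬(level < (45:Int)) from by omega, show ¬(level < (70:Int)) from by omega, show level < (90:Int) from by omega, show ¬(level < (80:Int)) from by omega, pvLookup_80]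
  · obtain ⟨h1, h2⟩ := h
    simp [pvRef, show (0:Int) ≤ level from by omega, show (5:Int) ≤ level from by omega, show (10:Int) ≤ level from by omega, show (15:Int) ≤ level from by omega, show (20:Int) ≤ level from by omega, show (25:Int) ≤ level from by omega, show (30:Int) ≤ level from by omega, show (35:Int) ≤ level from by omega, show (40:Int) ≤ level from by omega, show (45:Int) ≤ level from by omega, show (50:Int) ≤ level from by omega, show (55:Int) ≤ level from by omega, show (60:Int) ≤ level from by omega, show (65:Int) ≤ level from by omega, show (70:Int) ≤ level from by omega, show (75:Int) ≤ level from by omega, show (80:Int) ≤ level from by omega, show (90:Int) ≤ level from by omega, show ¬((100:Int) ≤ level) from by omega, show ¬(level < (45:Int)) from by omega, show ¬(level < (70:Int)) from by omega, show ¬(level < (90:Int)) from by omega, show level < (100:Int) from by omega, pvLookup_90]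
  · simp [pvRef, show (0:Int) ≤ level from by omega, show (5:Int) ≤ level from by omega, show (10:Int) ≤ level from by omega, show (15:Int) ≤ level from by omega, show (20:Int) ≤ level from by omega, show (25:Int) ≤ level from by omega, show (30:Int) ≤ level from by omega, show (35:Int) ≤ level from by omega, show (40:Int) ≤ level from by omega, show (45:Int) ≤ level from by omega, show (50:Int) ≤ level from by omega, show (55:Int) ≤ level from by omega, show (60:Int) ≤ level from by omega, show (65:Int) ≤ level from by omega, show (70:Int) ≤ level from by omega, show (75:Int) ≤ level from by omega, show (80:Int) ≤ level from by omega, show (90:Int) ≤ level from by omega, show (100:Int) ≤ level from by omega, show ¬(level < (45:Int)) from by omega, show ¬(level < (70:Int)) from by omega, show ¬(level < (90:Int)) from by omega, show ¬(level < (100:Int)) from by omega, pvLookup_100]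

-- ===== VERDICT (by name: the statement is the Claim_ definition above) =====
theorem get_rank_role_name_for_level_spec : Claim_equal_get_rank_role_name_for_level := by
  intro level _
  unfold Spec_get_rank_role_name_for_level
  rw [pvA_eq_ref, pvB_eq_ref]
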